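-- pv_equiv track=rewrite | github.com/cseproject-team7/fall-cse-senior-project | scripts/model_pipeline/reverse_model_disstilation/create_logs/model_based_logs.py | detect_pattern_heuristic
-- ===== SOURCE A (Python) =====
-- from typing import List, Dict, Any
--
-- def detect_pattern_heuristic(apps: List[str]) -> str:
--     """Detect pattern from app list using heuristics"""
--     apps_str = ' '.join([app.lower() for app in apps])
--
--     admin_apps = ['oasis', 'degreeworks', 'myusf', 'archivum', 'navigate', 'schedule planner']
--     career_apps = ['handshake', 'linkedin', 'indeed', 'glassdoor']
--     coding_apps = ['github', 'visual studio', 'jupyter', 'colab', 'matlab', 'replit', 'codepen']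
--     research_apps = ['jstor', 'ieee', 'google scholar', 'pubmed', 'arxiv', 'library']
--     social_apps = ['teams', 'yammer', 'slack', 'discord']
--
--     has_admin = any(any(admin_app in app.lower() for admin_app in admin_apps) for app in apps)
--     has_career = any(any(career_app in app.lower() for career_app in career_apps) for app in apps)
--     has_coding = any(any(coding_app in app.lower() for coding_app in coding_apps) for app in apps)
--     has_research = any(any(research_app in app.lower() for research_app in research_apps) for app in apps)
--     has_social = any(any(social_app in app.lower() for social_app in social_apps) for app in apps)
--     has_canvas = any('canvas' in app.lower() for app in apps)
--
--     if has_admin: return 'ADMIN'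
--     elif has_career: return 'CAREER'
--     elif 'club' in apps_str or 'organization' in apps_str: return 'CLUBS'
--     elif has_coding: return 'CODING'
--     elif has_research: return 'RESEARCH'
--     elif has_canvas and any(exam_app in apps_str for exam_app in ['onenote', 'pdf', 'word']): return 'EXAM'
--     elif has_social: return 'SOCIAL'
--     else: return 'COURSEWORK'
-- ===== SOURCE B (Python) =====
-- def detect_pattern_heuristic(apps):
--     """One pass over apps: lowercase each app once, accumulate category flags
--     and the lowered parts; then resolve in priority order."""
--     ADMIN = ('oasis', 'degreeworks', 'myusf', 'archivum', 'navigate', 'schedule planner')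
--     CAREER = ('handshake', 'linkedin', 'indeed', 'glassdoor')
--     CODING = ('github', 'visual studio', 'jupyter', 'colab', 'matlab', 'replit', 'codepen')
--     RESEARCH = ('jstor', 'ieee', 'google scholar', 'pubmed', 'arxiv', 'library')
--     SOCIAL = ('teams', 'yammer', 'slack', 'discord')
--     admin = career = coding = research = social = canvas = False
--     lowered = []
--     for app in apps:
--         low = app.lower()
--         lowered.append(low)
--         admin = admin or any(k in low for k in ADMIN)
--         career = career or any(k in low for k in CAREER)
--         coding = coding or any(k in low for k in CODING)
--         research = research or any(k in low for k in RESEARCH)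
--         social = social or any(k in low for k in SOCIAL)
--         canvas = canvas or 'canvas' in low
--     joined = ' '.join(lowered)
--     if admin:
--         return 'ADMIN'
--     if career:
--         return 'CAREER'
--     if 'club' in joined or 'organization' in joined:
--         return 'CLUBS'
--     if coding:
--         return 'CODING'
--     if research:
--         return 'RESEARCH'
--     if canvas and any(k in joined for k in ('onenote', 'pdf', 'word')):
--         return 'EXAM'
--     if social:
--         return 'SOCIAL'
--     return 'COURSEWORK'
-- ===== Notes on version B (the rewrite author's own statement) =====
-- stated objective: alternative
-- what changed: B makes a single pass over the app list, lowercasing each app once and accumulating all six category flags plus the lowered parts in one loop, instead of A's six separate any-scans each re-lowercasing every app; the club/organization and exam keywords are still tested against the space-joined lowered string.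
import Mathlib
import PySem

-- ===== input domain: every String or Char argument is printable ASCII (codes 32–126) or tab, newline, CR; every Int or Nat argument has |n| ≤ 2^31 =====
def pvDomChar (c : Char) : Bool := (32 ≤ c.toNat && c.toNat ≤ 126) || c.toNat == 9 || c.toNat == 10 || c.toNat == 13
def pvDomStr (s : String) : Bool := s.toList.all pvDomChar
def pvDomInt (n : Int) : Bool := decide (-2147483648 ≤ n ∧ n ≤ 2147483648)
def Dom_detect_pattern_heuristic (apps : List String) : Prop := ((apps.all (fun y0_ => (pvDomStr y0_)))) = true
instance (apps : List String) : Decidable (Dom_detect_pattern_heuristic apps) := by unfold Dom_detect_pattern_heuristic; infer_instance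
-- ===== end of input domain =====

-- B replaces A's six separate any-scans (each re-lowercasing every app) by one pass
-- that lowercases each app once and accumulates all six flags plus the lowered parts.

-- ===== PORT A =====
def pvAdminApps : List String := ["oasis", "degreeworks", "myusf", "archivum", "navigate", "schedule planner"]
def pvCareerApps : List String := ["handshake", "linkedin", "indeed", "glassdoor"]
def pvCodingApps : List String := ["github", "visual studio", "jupyter", "colab", "matlab", "replit", "codepen"]
def pvResearchApps : List String := ["jstor", "ieee", "google scholar", "pubmed", "arxiv", "library"]
def pvSocialApps : List String := ["teams", "yammer", "slack", "discord"]

def detect_pattern_heuristic (apps : List String) : String :=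
  let apps_str := PySem.Str.join " " (apps.map (fun app => PySem.Str.lower app))
  let has_admin := apps.any (fun app => pvAdminApps.any (fun k => PySem.Str.isIn k (PySem.Str.lower app)))
  let has_career := apps.any (fun app => pvCareerApps.any (fun k => PySem.Str.isIn k (PySem.Str.lower app)))
  let has_coding := apps.any (fun app => pvCodingApps.any (fun k => PySem.Str.isIn k (PySem.Str.lower app)))
  let has_research := apps.any (fun app => pvResearchApps.any (fun k => PySem.Str.isIn k (PySem.Str.lower app)))
  let has_social := apps.any (fun app => pvSocialApps.any (fun k => PySem.Str.isIn k (PySem.Str.lower app)))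
  let has_canvas := apps.any (fun app => PySem.Str.isIn "canvas" (PySem.Str.lower app))
  if has_admin then "ADMIN"
  else if has_career then "CAREER"
  else if PySem.Str.isIn "club" apps_str || PySem.Str.isIn "organization" apps_str then "CLUBS"
  else if has_coding then "CODING"
  else if has_research then "RESEARCH"
  else if has_canvas && (["onenote", "pdf", "word"].any (fun k => PySem.Str.isIn k apps_str)) then "EXAM"
  else if has_social then "SOCIAL"
  else "COURSEWORK"

-- ===== PORT B =====
structure PvSt where
  admin : Bool
  career : Bool
  coding : Bool
  research : Bool
  social : Bool
  canvas : Bool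
  lowered : List String
deriving Repr, DecidableEq

def pvStep (st : PvSt) (app : String) : PvSt :=
  let low := PySem.Str.lower app
  { admin := st.admin || pvAdminApps.any (fun k => PySem.Str.isIn k low)
    career := st.career || pvCareerApps.any (fun k => PySem.Str.isIn k low)
    coding := st.coding || pvCodingApps.any (fun k => PySem.Str.isIn k low)
    research := st.research || pvResearchApps.any (fun k => PySem.Str.isIn k low)
    social := st.social || pvSocialApps.any (fun k => PySem.Str.isIn k low)
    canvas := st.canvas || PySem.Str.isIn "canvas" low
    lowered := st.lowered ++ [low] }

def detect_pattern_heuristic_alt (apps : List String) : String :=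
  let st := apps.foldl pvStep ⟨false, false, false, false, false, false, []⟩
  let joined := PySem.Str.join " " st.lowered
  if st.admin then "ADMIN"
  else if st.career then "CAREER"
  else if PySem.Str.isIn "club" joined || PySem.Str.isIn "organization" joined then "CLUBS"
  else if st.coding then "CODING"
  else if st.research then "RESEARCH"
  else if st.canvas && (["onenote", "pdf", "word"].any (fun k => PySem.Str.isIn k joined)) then "EXAM"
  else if st.social then "SOCIAL"
  else "COURSEWORK"

-- ===== PRECONDITION & SPEC =====
def Spec_detect_pattern_heuristic (apps : List String) (out : String) : Prop := out = detect_pattern_heuristic_alt apps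
instance (apps : List String) (out : String) : Decidable (Spec_detect_pattern_heuristic apps out) := by unfold Spec_detect_pattern_heuristic; infer_instance

-- ===== CLAIM (what is proved, stated in full; the proofs are below) =====
def Claim_equal_detect_pattern_heuristic : Prop := ∀ (apps : List String), Dom_detect_pattern_heuristic apps → Spec_detect_pattern_heuristic apps (detect_pattern_heuristic apps)

-- ===== LEMMAS AND PROOFS =====

/-- The one-pass fold computes exactly the six `any`-scans and the map of lowered apps. -/
lemma pvStep_foldl (apps : List String) (st : PvSt) :
    apps.foldl pvStep st =
      { admin := st.admin || apps.any (fun app => pvAdminApps.any (fun k => PySem.Str.isIn k (PySem.Str.lower app)))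
        career := st.career || apps.any (fun app => pvCareerApps.any (fun k => PySem.Str.isIn k (PySem.Str.lower app)))
        coding := st.coding || apps.any (fun app => pvCodingApps.any (fun k => PySem.Str.isIn k (PySem.Str.lower app)))
        research := st.research || apps.any (fun app => pvResearchApps.any (fun k => PySem.Str.isIn k (PySem.Str.lower app)))
        social := st.social || apps.any (fun app => pvSocialApps.any (fun k => PySem.Str.isIn k (PySem.Str.lower app)))
        canvas := st.canvas || apps.any (fun app => PySem.Str.isIn "canvas" (PySem.Str.lower app))
        lowered := st.lowered ++ apps.map (fun app => PySem.Str.lower app) } := by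
  induction apps generalizing st with
  | nil => simp
  | cons a rest ih =>
      simp only [List.foldl_cons, ih, List.any_cons, List.map_cons]
      simp [pvStep, Bool.or_assoc]

-- ===== VERDICT (by name: the statement is the Claim_ definition above) =====
theorem detect_pattern_heuristic_spec : Claim_equal_detect_pattern_heuristic := by
  intro apps _
  unfold Spec_detect_pattern_heuristic detect_pattern_heuristic detect_pattern_heuristic_alt
  simp only [pvStep_foldl]
  simp
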